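-- pv_equiv track=rewrite | github.com/Penguin-jpg/Cipher | row_transposition.py | _key_transform
-- ===== SOURCE A (Python) =====
-- def _key_transform(key):
--     """Make key valid for Grille cipher"""
--     # 把所有字元轉ascii後接起來
--     digits = "".join(str(ord(char)) for char in key)
--
--     # 去除重複數字(順序不變)
--     deduplicated_digits = dict.fromkeys(digits)
--     # 如果有0要去掉
--     if "0" in deduplicated_digits:
--         deduplicated_digits.pop("0")
--
--     # 轉成字串
--     numeric_key = "".join(list(deduplicated_digits))
--
--     # 將缺的數字插到空隙中
--     index = 0
--     for num in range(1, int(max(numeric_key))):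
--         if str(num) not in numeric_key:
--             numeric_key = numeric_key[:index] + str(num) + numeric_key[index:]
--             index += 2
--
--     return numeric_key
-- ===== SOURCE B (Python) =====
-- def _key_transform(key):
--     """Make key valid for Grille cipher"""
--     # ascii digit string of the key
--     digits = "".join(str(ord(char)) for char in key)
--
--     # one-pass dedup that skips '0' entirely
--     seen = []
--     for c in digits:
--         if c != "0":
--             if c not in seen:
--                 seen.append(c)
--
--     # digits 1..max-1 (exclusive bound, as in the original) absent from the key digits
--     missing = [c for c in "123456789"[:int(max(seen)) - 1] if c not in seen]
--
--     # interleave missing-first with the deduplicated digits, longer tail appended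
--     out = []
--     i = 0
--     while i < len(missing) and i < len(seen):
--         out.append(missing[i])
--         out.append(seen[i])
--         i += 1
--     out.extend(missing[i:])
--     out.extend(seen[i:])
--     return "".join(out)
-- ===== Notes on version B (the rewrite author's own statement) =====
-- stated objective: alternative
-- what changed: B deduplicates with a one-pass seen-list that skips '0' (instead of dict.fromkeys followed by pop), computes the list of missing digits below int(max(...)) once, and builds the result by interleaving that list with the deduplicated digits (instead of splicing each missing digit into the string at a moving in-place index).
import Mathlib
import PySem

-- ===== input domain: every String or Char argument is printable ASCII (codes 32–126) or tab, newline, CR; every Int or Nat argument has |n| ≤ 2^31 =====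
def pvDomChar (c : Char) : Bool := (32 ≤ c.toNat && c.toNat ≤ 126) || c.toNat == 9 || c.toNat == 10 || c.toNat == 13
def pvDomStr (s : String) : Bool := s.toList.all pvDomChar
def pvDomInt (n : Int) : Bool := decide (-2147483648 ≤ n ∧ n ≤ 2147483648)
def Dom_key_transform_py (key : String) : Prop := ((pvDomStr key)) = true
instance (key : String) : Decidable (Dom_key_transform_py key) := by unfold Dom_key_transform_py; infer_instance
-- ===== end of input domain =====

-- B replaces A's in-place splice loop (repeated slicing of the string at a moving index) by
-- computing the missing digits once and interleaving them with the deduplicated digits;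
-- objective: alternative (a different construction of the same output, similar cost).

-- ===== PORT A =====
-- the body of A's for-loop: `if str(num) not in numeric_key: numeric_key = numeric_key[:index]
-- + str(num) + numeric_key[index:]; index += 2`, on the state (numeric_key, index)
def pvStepA (st : List Char × Int) (num : Int) : List Char × Int :=
  if PySem.Chars.isIn (PySem.Int.toChars num) st.1 = false then
    (PySem.List.slice st.1 none (some st.2) ++ PySem.Int.toChars num
      ++ PySem.List.slice st.1 (some st.2) none, st.2 + 2)
  else st

-- literal transliteration of A: join of str(ord(c)), dict.fromkeys dedup (PySem.List.dedup),
-- pop of '0', then the for-loop over range(1, int(max(...))) splicing str(num) at `index`.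
def key_transform_py (key : String) : String :=
  let digits := PySem.Chars.join [] (key.toList.map (fun c => PySem.Int.toChars (Int.ofNat c.toNat)))
  let dd := PySem.List.dedup digits
  let dd := if dd.contains '0' then dd.erase '0' else dd
  match PySem.List.max? dd (fun c => c) with
  | none => ""   -- Python: max("") raises ValueError — excluded by Pre_
  | some mx =>
    match PySem.Int.ofChars? [mx] with
    | none => ""  -- Python: int() ValueError (never reached: mx is a decimal digit)
    | some m =>
      let st := (PySem.List.pyRange 1 m 1).foldl pvStepA (dd, 0)
      String.ofList st.1

-- ===== PORT B =====
-- B's interleave while-loop: pair off elements while both lists last, then append the tails.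
def pvInterleave : List Char → List Char → List Char
  | [], ys => ys
  | x :: xs, [] => x :: xs
  | x :: xs, y :: ys => x :: y :: pvInterleave xs ys

def key_transform_py_alt (key : String) : String :=
  let digits := PySem.Chars.join [] (key.toList.map (fun c => PySem.Int.toChars (Int.ofNat c.toNat)))
  let seen := digits.foldl
    (fun acc c => if c ≠ '0' then (if acc.contains c then acc else acc ++ [c]) else acc) []
  match PySem.List.max? seen (fun c => c) with
  | none => ""   -- Python: max("") raises ValueError — excluded by Pre_
  | some mx =>
    match PySem.Int.ofChars? [mx] with
    | none => ""  -- Python: int() ValueError (never reached: mx is a decimal digit)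
    | some m =>
      let missing := (PySem.List.slice "123456789".toList none (some (m - 1))).filter
        (fun c => !(seen.contains c))
      String.ofList (pvInterleave missing seen)

-- ===== PRECONDITION & SPEC =====
-- Pre_ excludes only the empty key, on which both Pythons raise ValueError (max of empty sequence).
def Pre_key_transform_py (key : String) : Prop := key ≠ ""
instance (key : String) : Decidable (Pre_key_transform_py key) := by unfold Pre_key_transform_py; infer_instance
def pvWitness_key_transform_py : String := "key"

def Spec_key_transform_py (key : String) (out : String) : Prop := out = key_transform_py_alt key
instance (key : String) (out : String) : Decidable (Spec_key_transform_py key out) := by unfold Spec_key_transform_py; infer_instance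

-- ===== CLAIM (what is proved, stated in full; the proofs are below) =====
def Claim_equal_key_transform_py : Prop := ∀ (key : String), Dom_key_transform_py key → Pre_key_transform_py key → Spec_key_transform_py key (key_transform_py key)

-- ===== LEMMAS AND PROOFS =====

def pvS9 : List Char := ['1','2','3','4','5','6','7','8','9']

-- the digits among '1'..(the t-1 first nonzero digits) still missing from nk
def pvMiss (t : Int) (nk : List Char) : List Char :=
  (List.take (t - 1).toNat pvS9).filter (fun c => !(nk.contains c))

theorem pv_join_nil (l : List (List Char)) : PySem.Chars.join [] l = l.flatten := by
  show List.intercalate [] l = l.flatten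
  simp [List.intercalate]
  induction l with
  | nil => rfl
  | cons x xs ih =>
    cases xs with
    | nil => simp
    | cons y ys => simp_all [List.intersperse]

theorem pv_isIn_singleton (l : List Char) (a : Char) :
    PySem.Chars.isIn [a] l = l.contains a := by
  rcases h : PySem.Chars.isIn [a] l with _|_
  · have := (PySem.Chars.isIn_eq_false_iff (sub := [a]) (s := l)).mp h
    simp [List.singleton_infix_iff] at this
    simp [this]
  · have := (PySem.Chars.isIn_iff_infix (sub := [a]) (s := l)).mp h
    simp [List.singleton_infix_iff] at this
    simp [this]

set_option maxRecDepth 10000 in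
theorem pv_toChars_digit : (List.range 127).all
    (fun n => (PySem.Int.toChars (Int.ofNat n)).all Char.isDigit) = true := by
  rfl

theorem pv_mem_interleave (xs ys : List Char) (c : Char) :
    c ∈ pvInterleave xs ys ↔ c ∈ xs ∨ c ∈ ys := by
  fun_induction pvInterleave xs ys <;> simp_all
  tauto

theorem pv_insert_interleave (A L : List Char) (x : Char) :
    List.take (2 * A.length) (pvInterleave A L) ++ [x] ++ List.drop (2 * A.length) (pvInterleave A L)
      = pvInterleave (A ++ [x]) L := by
  induction A generalizing L with
  | nil => cases L <;> simp [pvInterleave]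
  | cons a A ih =>
    cases L with
    | nil =>
      have hlen : (pvInterleave (a :: A) []).length ≤ 2 * (a :: A).length := by
        simp [pvInterleave]
      rw [List.take_of_length_le hlen, List.drop_of_length_le hlen]
      simp [pvInterleave]
    | cons l L =>
      have h2 : 2 * (a :: A).length = (2 * A.length) + 1 + 1 := by simp; ring
      simp only [pvInterleave, h2, List.take_succ_cons, List.drop_succ_cons, List.cons_append]
      rw [← ih L]

theorem pv_add_filter (s : PySem.Set Char) (x : Char) (q : Char → Bool) :
    (PySem.Set.add s x).filter q
      = if q x then PySem.Set.add (s.filter q) x else s.filter q := by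
  simp only [PySem.Set.add]
  by_cases hx : x ∈ s <;> by_cases hq : q x <;>
    simp [hx, hq, List.filter_append, List.mem_filter]

theorem pv_ofList_filter (l : List Char) (q : Char → Bool) :
    PySem.Set.ofList (l.filter q) = (PySem.Set.ofList l).filter q := by
  induction l using List.reverseRecOn with
  | nil => rfl
  | append_singleton l x ih =>
    rw [List.filter_append, PySem.Set.ofList_append_singleton, pv_add_filter, ← ih]
    by_cases hq : q x <;> simp [hq, PySem.Set.ofList_append_singleton]

-- B's one-pass dedup-skipping-'0' loop equals A's dict.fromkeys dedup followed by pop('0')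
theorem pv_dedup_eq (digits : List Char) :
    digits.foldl
      (fun acc c => if c ≠ '0' then (if acc.contains c then acc else acc ++ [c]) else acc) []
    = (if (PySem.List.dedup digits).contains '0' then (PySem.List.dedup digits).erase '0'
       else PySem.List.dedup digits) := by
  have h1 : digits.foldl
      (fun acc c => if c ≠ '0' then (if acc.contains c then acc else acc ++ [c]) else acc) []
      = (digits.filter (fun c => decide (c ≠ '0'))).foldl
          (fun acc c => if acc.contains c then acc else acc ++ [c]) [] :=
    PySem.List.foldl_ite_eq_foldl_filter (fun c => c ≠ '0')
      (fun acc c => if acc.contains c then acc else acc ++ [c]) digits []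
  have h2 : (digits.filter (fun c => decide (c ≠ '0'))).foldl
      (fun acc c => if acc.contains c then acc else acc ++ [c]) []
      = PySem.Set.ofList (digits.filter (fun c => decide (c ≠ '0'))) := rfl
  rw [h1, h2, pv_ofList_filter]
  simp only [PySem.List.dedup_eq_ofList]
  by_cases h0 : ('0' : Char) ∈ PySem.Set.ofList digits
  · rw [if_pos (by simpa using h0)]
    rw [List.Nodup.erase_eq_filter (PySem.Set.nodup_ofList digits) '0']
    congr 1
    funext c
    simp only [bne]
    cases h : c == '0' <;> simp_all
  · rw [if_neg (by simpa using h0)]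
    apply List.filter_eq_self.2
    intro a ha
    simp only [decide_eq_true_eq]
    exact fun h => h0 (h ▸ ha)

theorem pv_toChars_single (t : Int) (h1 : 1 ≤ t) (h9 : t ≤ 9) :
    PySem.Int.toChars t = [Char.ofNat (48 + t.toNat)] := by
  interval_cases t <;> rfl

theorem pv_take_s9_succ (t : Int) (h1 : 1 ≤ t) (h9 : t ≤ 9) :
    List.take t.toNat pvS9 = List.take (t - 1).toNat pvS9 ++ [Char.ofNat (48 + t.toNat)] := by
  interval_cases t <;> decide

theorem pv_not_mem_take_s9 (t : Int) (h1 : 1 ≤ t) (h9 : t ≤ 9) :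
    Char.ofNat (48 + t.toNat) ∉ List.take (t - 1).toNat pvS9 := by
  interval_cases t <;> decide

-- one iteration of A's loop, on the invariant state
theorem pv_step (nk A : List Char) (t : Int) (c : Char)
    (hts : PySem.Int.toChars t = [c]) (hcA : c ∉ A) :
    pvStepA (pvInterleave A nk, 2 * (A.length : Int)) t
      = (pvInterleave (A ++ (if nk.contains c then [] else [c])) nk,
         2 * (((A ++ (if nk.contains c then [] else [c])).length : Int))) := by
  unfold pvStepA
  rw [hts, pv_isIn_singleton]
  cases hc : nk.contains c
  · have hnk : c ∉ nk := by simpa using hc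
    have hmem : (pvInterleave A nk).contains c = false := by
      have : c ∉ pvInterleave A nk := by rw [pv_mem_interleave]; tauto
      simpa using this
    rw [hmem]
    rw [PySem.List.slice_to _ (by positivity), PySem.List.slice_from _ (by positivity)]
    have h3 : (2 * (A.length : Int)).toNat = 2 * A.length := by omega
    rw [h3]
    rw [pv_insert_interleave]
    simp
    ring
  · have hnk : c ∈ nk := by simpa using hc
    have hmem : (pvInterleave A nk).contains c = true := by
      have : c ∈ pvInterleave A nk := by rw [pv_mem_interleave]; tauto
      simpa using this
    rw [hmem]
    simp

-- invariant of A's splice loop: after nums 1..t-1, the string is the missing digits so far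
-- interleaved with nk, and `index` is twice the number of insertions
theorem pv_loop_inv (nk : List Char) (m : Int) (hm : m ≤ 9) (t : Int) (h1 : 1 ≤ t) (ht : t ≤ m) :
    (PySem.List.pyRange 1 t 1).foldl pvStepA (nk, 0)
      = (pvInterleave (pvMiss t nk) nk, 2 * ((pvMiss t nk).length : Int)) := by
  induction t, h1 using Int.le_induction with
  | base =>
    rw [PySem.List.pyRange_one_eq_nil (by omega)]
    simp [pvMiss, pvInterleave]
  | succ n hn ih =>
    rw [PySem.List.pyRange_one_succ_right (by omega)]
    rw [List.foldl_append]
    rw [ih (by omega)]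
    simp only [List.foldl_cons, List.foldl_nil]
    have hA : Char.ofNat (48 + n.toNat) ∉ pvMiss n nk := by
      intro h
      exact pv_not_mem_take_s9 n (by omega) (by omega) (List.mem_of_mem_filter h)
    rw [pv_step nk (pvMiss n nk) n (Char.ofNat (48 + n.toNat))
      (pv_toChars_single n (by omega) (by omega)) hA]
    have hMiss : pvMiss (n + 1) nk
        = pvMiss n nk
          ++ (if nk.contains (Char.ofNat (48 + n.toNat)) then []
              else [Char.ofNat (48 + n.toNat)]) := by
      unfold pvMiss
      have he : (n + 1 - 1).toNat = n.toNat := by omega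
      rw [he, pv_take_s9_succ n (by omega) (by omega), List.filter_append]
      cases hc : nk.contains (Char.ofNat (48 + n.toNat)) <;> simp <;> simpa using hc
    rw [hMiss]

-- a digit char other than '0' reads back as its value 1..9
theorem pv_digit_val (c : Char) (hd : c.isDigit) (h0 : c ≠ '0') :
    PySem.Int.ofChars? [c] = some ((c.toNat : Int) - 48)
      ∧ 1 ≤ (c.toNat : Int) - 48 ∧ (c.toNat : Int) - 48 ≤ 9 := by
  have hb : 48 ≤ c.toNat ∧ c.toNat ≤ 57 := by
    simp [Char.isDigit] at hd
    exact ⟨hd.1, hd.2⟩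
  have hofn : Char.ofNat c.toNat = c := Char.ofNat_toNat c
  have hne : c.toNat ≠ 48 := by
    intro h
    apply h0
    rw [← hofn, h]
  obtain ⟨hb1, hb2⟩ := hb
  interval_cases h : c.toNat <;> rw [← hofn] <;> first | (exfalso; omega) | decide

-- inside Dom every char of the joined ord-string is a decimal digit
theorem pv_digits_digit (key : String) (hDom : Dom_key_transform_py key) (c : Char)
    (hc : c ∈ PySem.Chars.join []
      (key.toList.map (fun ch => PySem.Int.toChars (Int.ofNat ch.toNat)))) :
    c.isDigit := by
  rw [pv_join_nil] at hc
  obtain ⟨l, hl, hcl⟩ := List.mem_flatten.mp hc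
  obtain ⟨ch, hch, rfl⟩ := List.mem_map.mp hl
  have hdom : pvDomChar ch = true := by
    have := (List.all_eq_true.mp hDom) ch hch
    simpa using this
  have hle : ch.toNat < 127 := by
    simp [pvDomChar] at hdom
    omega
  have := List.all_eq_true.mp pv_toChars_digit ch.toNat (by simpa using hle)
  exact List.all_eq_true.mp (by simpa using this) c hcl

-- ===== VERDICT (by name: the statement is the Claim_ definition above) =====
theorem key_transform_py_spec : Claim_equal_key_transform_py := by
  intro key hDom hPre
  unfold Spec_key_transform_py
  show key_transform_py key = key_transform_py_alt key
  simp only [key_transform_py, key_transform_py_alt]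
  rw [pv_dedup_eq]
  set digits := PySem.Chars.join []
    (key.toList.map (fun c => PySem.Int.toChars (Int.ofNat c.toNat))) with hdig
  set S := if (PySem.List.dedup digits).contains '0' then (PySem.List.dedup digits).erase '0'
    else (PySem.List.dedup digits) with hSdef
  have hSprop : ∀ c ∈ S, c.isDigit ∧ c ≠ '0' := by
    intro c hcS
    have hsub : c ∈ PySem.List.dedup digits ∧ c ≠ '0' := by
      rw [hSdef] at hcS
      by_cases h0 : (PySem.List.dedup digits).contains '0'
      · rw [if_pos h0] at hcS
        have := (List.Nodup.mem_erase_iff (by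
          simp [PySem.List.dedup_eq_ofList, PySem.Set.nodup_ofList])).mp hcS
        exact ⟨this.2, this.1⟩
      · rw [if_neg h0] at hcS
        refine ⟨hcS, fun hc0 => h0 ?_⟩
        rw [← hc0]
        simpa using hcS
    have hmemd : c ∈ digits := by
      have := hsub.1
      rw [PySem.List.dedup_eq_ofList] at this
      exact (PySem.Set.mem_ofList digits c).mp this
    exact ⟨pv_digits_digit key hDom c hmemd, hsub.2⟩
  cases hmx : PySem.List.max? S (fun c => c) with
  | none => rfl
  | some mx =>
    obtain ⟨hd, h0⟩ := hSprop mx (PySem.List.max?_mem hmx)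
    obtain ⟨hof, hm1, hm9⟩ := pv_digit_val mx hd h0
    simp only [hof]
    rw [pv_loop_inv S ((mx.toNat : Int) - 48) hm9 ((mx.toNat : Int) - 48) hm1 le_rfl]
    rw [PySem.List.slice_to _ (by omega : (0:Int) ≤ (mx.toNat : Int) - 48 - 1)]
    have h123 : "123456789".toList = pvS9 := rfl
    rw [h123]
    rfl
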